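-- pv_equiv track=rewrite | github.com/daniel-reich/ubiquitous-fiesta | PSg77AZJGACk4a7gt_21.py | meme_sum
-- ===== SOURCE A (Python) =====
-- def meme_sum(a, b):
--   a = str(a)
--   b = str(b)
--   la = len(a)
--   lb = len(b)
--   a = a if la > lb else '0' * (lb - la) + a
--   b = b if lb > la else '0' * (la - lb) + b
--   return int(''.join(str(int(i) + int(j)) for i, j in zip(a, b)))
-- ===== SOURCE B (Python) =====
-- def meme_sum(a, b):
--     digits = []
--     while a > 0 or b > 0:
--         digits.append(str(a % 10 + b % 10))
--         a //= 10
--         b //= 10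
--     return int(''.join(reversed(digits))) if digits else 0
-- ===== Notes on version B (the rewrite author's own statement) =====
-- stated objective: alternative
-- what changed: B never converts the inputs to strings: it extracts digit pairs arithmetically (a%10, b%10 with a//=10, b//=10) least-significant first, collecting each digit-sum's string in a list, then reverses and joins once, instead of A's str()-pad-to-equal-length + zip + per-character int() parsing.
import Mathlib
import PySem

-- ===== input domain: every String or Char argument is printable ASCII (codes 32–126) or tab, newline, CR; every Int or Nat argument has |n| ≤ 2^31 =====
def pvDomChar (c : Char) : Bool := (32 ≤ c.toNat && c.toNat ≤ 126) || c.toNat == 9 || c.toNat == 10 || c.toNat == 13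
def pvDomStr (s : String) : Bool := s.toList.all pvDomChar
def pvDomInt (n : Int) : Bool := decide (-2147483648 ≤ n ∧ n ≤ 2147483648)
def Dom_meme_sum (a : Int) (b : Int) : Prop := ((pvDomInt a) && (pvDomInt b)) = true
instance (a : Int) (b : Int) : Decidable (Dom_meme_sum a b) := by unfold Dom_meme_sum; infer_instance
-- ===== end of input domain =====

-- B replaces A's str()-the-inputs + pad-to-equal-length + zip + per-character-int() pipeline by
-- arithmetic digit extraction (a%10 / a//=10), collecting digit-sum strings least-significant
-- first and joining them once after a reversal; same cost, a different algorithm.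

-- int(c) for a one-character string c (used by A on single characters)
def pyIntCh (c : Char) : Int := (PySem.Int.ofChars? [c]).getD 0

-- ===== PORT A =====
def meme_sum (a : Int) (b : Int) : Int :=
  let sa := PySem.Int.toChars a
  let sb := PySem.Int.toChars b
  let la := sa.length
  let lb := sb.length
  let pa := if la > lb then sa else List.replicate (lb - la) '0' ++ sa
  let pb := if lb > la then sb else List.replicate (la - lb) '0' ++ sb
  (PySem.Int.ofChars?
    ((pa.zip pb).flatMap (fun ij => PySem.Int.toChars (pyIntCh ij.1 + pyIntCh ij.2)))).getD 0

-- ===== PORT B =====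
-- the while loop of Source B: digits accumulates str(a%10 + b%10) per iteration; fuel only makes the
-- recursion structural (the loop runs at most a.toNat + b.toNat times, so the fuel never runs out)
def bLoop : Nat → Int → Int → List (List Char) → List (List Char)
  | 0, _, _, digits => digits
  | fuel + 1, a, b, digits =>
    if 0 < a ∨ 0 < b then
      bLoop fuel (PySem.Int.floordiv a 10) (PySem.Int.floordiv b 10)
        (digits ++ [PySem.Int.toChars (PySem.Int.mod a 10 + PySem.Int.mod b 10)])
    else digits

def meme_sum_alt (a : Int) (b : Int) : Int :=
  let digits := bLoop (a.toNat + b.toNat + 1) a b []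
  if digits ≠ [] then (PySem.Int.ofChars? digits.reverse.flatten).getD 0 else 0

-- ===== PRECONDITION & SPEC =====
-- Python A raises ValueError on any negative argument (int('-') on the sign character);
-- Pre_ excludes exactly those inputs.
def Pre_meme_sum (a : Int) (b : Int) : Prop := 0 ≤ a ∧ 0 ≤ b
instance (a : Int) (b : Int) : Decidable (Pre_meme_sum a b) := by unfold Pre_meme_sum; infer_instance
def pvWitness_meme_sum : Int × Int := (15, 7)

def Spec_meme_sum (a : Int) (b : Int) (out : Int) : Prop := out = meme_sum_alt a b
instance (a : Int) (b : Int) (out : Int) : Decidable (Spec_meme_sum a b out) := by unfold Spec_meme_sum; infer_instance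

-- ===== CLAIM =====
def Claim_equal_meme_sum : Prop := ∀ (a : Int) (b : Int), Dom_meme_sum a b → Pre_meme_sum a b → Spec_meme_sum a b (meme_sum a b)

-- ===== LEMMAS AND PROOFS =====

-- pad l on the left with '0' to length t
def padTo (t : Nat) (l : List Char) : List Char := List.replicate (t - l.length) '0' ++ l

def piece : Char × Char → List Char := fun ij => PySem.Int.toChars (pyIntCh ij.1 + pyIntCh ij.2)

-- A's joined digit-sum list for naturals m, n at padding width t
def J (t m n : Nat) : List Char :=
  ((padTo t (Nat.toDigits 10 m)).zip (padTo t (Nat.toDigits 10 n))).flatMap piece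

theorem toChars_natCast (m : Nat) : PySem.Int.toChars (m : Int) = Nat.toDigits 10 m := by
  simp [PySem.Int.toChars]

theorem pyIntCh_digitChar (d : Nat) (h : d < 10) : pyIntCh (Nat.digitChar d) = (d : Int) := by
  interval_cases d <;> decide

theorem length_padTo (t : Nat) (l : List Char) (h : l.length ≤ t) : (padTo t l).length = t := by
  simp [padTo]; omega

theorem padTo_max_left (la lb : Nat) (sa : List Char) (hla : sa.length = la) :
    padTo (max la lb) sa = if la > lb then sa else List.replicate (lb - la) '0' ++ sa := by
  by_cases h : la > lb
  · simp [padTo, if_pos h, hla, Nat.max_eq_left (by omega : lb ≤ la)]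
  · simp [padTo, if_neg h, hla, Nat.max_eq_right (by omega : la ≤ lb)]

theorem padTo_max_right (la lb : Nat) (sb : List Char) (hlb : sb.length = lb) :
    padTo (max la lb) sb = if lb > la then sb else List.replicate (la - lb) '0' ++ sb := by
  rw [Nat.max_comm]; exact padTo_max_left lb la sb hlb

theorem toDigits_len_div (m : Nat) (h : 10 ≤ m) :
    (Nat.toDigits 10 (m / 10)).length + 1 = (Nat.toDigits 10 m).length := by
  rw [Nat.toDigits_of_base_le (by norm_num) h]; simp

theorem toDigits_len_div_le (m t : Nat) (ht : 1 ≤ t) (h : (Nat.toDigits 10 m).length ≤ t + 1) :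
    (Nat.toDigits 10 (m / 10)).length ≤ t := by
  by_cases hm : m < 10
  · rw [Nat.div_eq_of_lt hm, Nat.toDigits_zero]; simpa using ht
  · have := toDigits_len_div m (by omega); omega

theorem padTo_step_nat (t m : Nat) (ht : 1 ≤ t) :
    padTo (t + 1) (Nat.toDigits 10 m) =
      padTo t (Nat.toDigits 10 (m / 10)) ++ [Nat.digitChar (m % 10)] := by
  by_cases h : m < 10
  · rw [Nat.div_eq_of_lt h, Nat.mod_eq_of_lt h, Nat.toDigits_zero, Nat.toDigits_of_lt_base h]
    simp only [padTo, List.length_singleton, Nat.add_sub_cancel, List.append_assoc,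
      List.singleton_append]
    have : t = (t - 1) + 1 := by omega
    rw [this, List.replicate_succ']
    simp
  · rw [Nat.toDigits_of_base_le (by norm_num) (by omega : 10 ≤ m)]
    simp only [padTo, List.length_append, List.length_singleton]
    rw [show t + 1 - ((Nat.toDigits 10 (m / 10)).length + 1)
          = t - (Nat.toDigits 10 (m / 10)).length from by omega,
        List.append_assoc]

theorem J_step (t m n : Nat) (ht : 1 ≤ t)
    (hm : (Nat.toDigits 10 m).length ≤ t + 1) (hn : (Nat.toDigits 10 n).length ≤ t + 1) :
    J (t + 1) m n = J t (m / 10) (n / 10) ++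
      PySem.Int.toChars ((m % 10 : Nat) + (n % 10 : Nat)) := by
  unfold J
  rw [padTo_step_nat t m ht, padTo_step_nat t n ht,
    List.zip_append (by
      rw [length_padTo t _ (toDigits_len_div_le m t ht hm),
          length_padTo t _ (toDigits_len_div_le n t ht hn)]),
    List.flatMap_append]
  simp only [List.zip_cons_cons, List.zip_nil_right, List.flatMap_cons, List.flatMap_nil,
    List.append_nil, piece, pyIntCh_digitChar _ (Nat.mod_lt m (by norm_num)),
    pyIntCh_digitChar _ (Nat.mod_lt n (by norm_num))]

theorem fd10_cast (m : Nat) : PySem.Int.floordiv (m : Int) 10 = ((m / 10 : Nat) : Int) := by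
  rw [PySem.Int.floordiv_eq_ediv_of_pos (by norm_num)]; omega

theorem md10_cast (m : Nat) : PySem.Int.mod (m : Int) 10 = ((m % 10 : Nat) : Int) := by
  rw [PySem.Int.mod_eq_emod_of_pos (by norm_num)]; omega

theorem bLoop_append (fuel : Nat) : ∀ (a b : Int) (acc : List (List Char)),
    bLoop fuel a b acc = acc ++ bLoop fuel a b [] := by
  induction fuel with
  | zero => intro a b acc; simp [bLoop]
  | succ f ih =>
    intro a b acc
    by_cases h : 0 < a ∨ 0 < b
    · simp only [bLoop, if_pos h]
      rw [ih _ _ (acc ++ _), ih _ _ ([] ++ _)]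
      simp
    · simp [bLoop, if_neg h]

theorem main_eq (t : Nat) : ∀ (fuel m n : Nat), m + n < fuel →
    (Nat.toDigits 10 m).length ≤ t → (Nat.toDigits 10 n).length ≤ t →
    ((Nat.toDigits 10 m).length = t ∨ (Nat.toDigits 10 n).length = t) → 0 < m + n →
    J t m n = (bLoop fuel (m : Int) (n : Int) []).reverse.flatten := by
  induction t with
  | zero =>
    intro fuel m n _ hm _ _ _
    have := @Nat.length_toDigits_pos 10 m
    omega
  | succ t ih =>
    intro fuel m n hfuel hm hn hmax hpos
    obtain ⟨f, rfl⟩ : ∃ f, fuel = f + 1 := ⟨fuel - 1, by omega⟩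
    have hcond : (0 : Int) < (m : Int) ∨ (0 : Int) < (n : Int) := by omega
    simp only [bLoop, if_pos hcond, fd10_cast, md10_cast, List.nil_append]
    rw [bLoop_append]
    simp only [List.singleton_append, List.reverse_cons, List.flatten_append, List.flatten_cons,
      List.flatten_nil, List.append_nil]
    by_cases ht : 1 ≤ t
    · -- inner case: at least one of m, n still has ≥ 2 digits
      have hq : 0 < m / 10 + n / 10 := by
        rcases hmax with h | h
        · have : 10 ≤ m := by
            by_contra hc
            rw [Nat.toDigits_of_lt_base (by omega)] at h
            simp at h; omega
          have := Nat.div_pos (by omega : 10 ≤ m) (by norm_num)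
          omega
        · have : 10 ≤ n := by
            by_contra hc
            rw [Nat.toDigits_of_lt_base (by omega)] at h
            simp at h; omega
          have := Nat.div_pos (by omega : 10 ≤ n) (by norm_num)
          omega
      have hqmax : (Nat.toDigits 10 (m / 10)).length = t ∨ (Nat.toDigits 10 (n / 10)).length = t := by
        rcases hmax with h | h
        · left
          have h10 : 10 ≤ m := by
            by_contra hc
            rw [Nat.toDigits_of_lt_base (by omega)] at h
            simp at h; omega
          have := toDigits_len_div m h10; omega
        · right
          have h10 : 10 ≤ n := by
            by_contra hc
            rw [Nat.toDigits_of_lt_base (by omega)] at h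
            simp at h; omega
          have := toDigits_len_div n h10; omega
      rw [J_step t m n ht hm hn, ih f (m / 10) (n / 10) (by
            have h1 : m / 10 ≤ m := Nat.div_le_self m 10
            have h2 : n / 10 ≤ n := Nat.div_le_self n 10
            omega)
          (toDigits_len_div_le m t ht hm) (toDigits_len_div_le n t ht hn) hqmax hq]
    · -- base case t = 0: both m and n are single digits
      have ht0 : t = 0 := by omega
      subst ht0
      have hm9 : m < 10 := by
        have := @Nat.length_toDigits_pos 10 m
        by_contra hc
        have := toDigits_len_div m (by omega)
        have := @Nat.length_toDigits_pos 10 (m / 10)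
        omega
      have hn9 : n < 10 := by
        have := @Nat.length_toDigits_pos 10 n
        by_contra hc
        have := toDigits_len_div n (by omega)
        have := @Nat.length_toDigits_pos 10 (n / 10)
        omega
      obtain ⟨g, rfl⟩ : ∃ g, f = g + 1 := ⟨f - 1, by omega⟩
      rw [Nat.div_eq_of_lt hm9, Nat.div_eq_of_lt hn9, Nat.mod_eq_of_lt hm9, Nat.mod_eq_of_lt hn9]
      simp only [Nat.cast_zero, bLoop, lt_self_iff_false, or_self, if_false,
        List.reverse_nil, List.flatten_nil, List.nil_append]
      unfold J
      rw [Nat.toDigits_of_lt_base hm9, Nat.toDigits_of_lt_base hn9]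
      simp only [padTo, List.length_singleton, Nat.sub_self, List.replicate_zero,
        List.nil_append, List.zip_cons_cons, List.zip_nil_right, List.flatMap_cons,
        List.flatMap_nil, List.append_nil, piece, pyIntCh_digitChar m hm9,
        pyIntCh_digitChar n hn9]

theorem bLoop_ne_nil (f m n : Nat) (hpos : 0 < m + n) :
    bLoop (f + 1) (m : Int) (n : Int) [] ≠ [] := by
  have hcond : (0 : Int) < (m : Int) ∨ (0 : Int) < (n : Int) := by omega
  simp only [bLoop, if_pos hcond]
  rw [bLoop_append]
  simp

-- ===== VERDICT =====
theorem meme_sum_spec : Claim_equal_meme_sum := by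
  intro a b _ hpre
  unfold Spec_meme_sum
  obtain ⟨ha, hb⟩ : 0 ≤ a ∧ 0 ≤ b := hpre
  obtain ⟨m, rfl⟩ : ∃ m : Nat, a = (m : Int) := ⟨a.toNat, by omega⟩
  obtain ⟨n, rfl⟩ : ∃ n : Nat, b = (n : Int) := ⟨b.toNat, by omega⟩
  by_cases hpos : 0 < m + n
  · have hA : meme_sum (m : Int) (n : Int) =
        (PySem.Int.ofChars? (J (max (Nat.toDigits 10 m).length (Nat.toDigits 10 n).length) m n)).getD 0 := by
      simp only [meme_sum, toChars_natCast]
      rw [← padTo_max_left (Nat.toDigits 10 m).length (Nat.toDigits 10 n).length _ rfl,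
          ← padTo_max_right (Nat.toDigits 10 m).length (Nat.toDigits 10 n).length _ rfl]
      rfl
    rw [hA, main_eq _ (m + n + 1) m n (by omega) (Nat.le_max_left _ _) (Nat.le_max_right _ _)
      (by rcases le_total (Nat.toDigits 10 m).length (Nat.toDigits 10 n).length with h | h
          · right; exact (Nat.max_eq_right h).symm
          · left; exact (Nat.max_eq_left h).symm) hpos]
    simp only [meme_sum_alt, Int.toNat_natCast]
    rw [if_pos (bLoop_ne_nil (m + n) m n hpos)]
  · obtain ⟨rfl, rfl⟩ : m = 0 ∧ n = 0 := by omega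
    decide
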